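-- pv_equiv track=rewrite | github.com/nikerzetic/programiranje-1 | 0-0-0izpit0-0-0/Nik_Erzetic.py | pobeg_iz_mocvirja
-- ===== SOURCE A (Python) =====
-- from functools import lru_cache
--
-- def pobeg_iz_mocvirja(swamp):
--     l = len(swamp)
--
--     @lru_cache(maxsize=None)
--     def aux(energy, k):
--         bonus = swamp[k]
--         times = []
--         if energy + bonus > l-k:
--             return 1
--         else:
--             for i in range(1, energy+bonus+1):
--                 times.append(aux(energy-i, k+i))
--             return 1 + min(times)
--
--     return aux(0, 0)
-- ===== SOURCE B (Python) =====
-- def pobeg_iz_mocvirja(swamp):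
--     # Key fact: A's aux(energy, k) is always called with energy == -k, so the
--     # state space is just the position k.  The positions A can ever visit are
--     # exactly 0..M where M is the least fixpoint of the jump-reach relation.
--     l = len(swamp)
--     M, k = 0, 0
--     while k <= M:
--         b = swamp[k]
--         if b <= l and b > M:
--             M = b
--         k += 1
--     # Bottom-up table over the reachable positions only:
--     # f holds the values for positions k+1..M; position k needs f[0..b-k-1].
--     f = []
--     for k in range(M, -1, -1):
--         b = swamp[k]
--         if b > l:
--             v = 1
--         else:
--             v = 1 + min(f[j] for j in range(b - k))
--         f = [v] + f
--     return f[0]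
-- ===== Notes on version B (the rewrite author's own statement) =====
-- stated objective: alternative
-- what changed: Exploits the invariant energy == -k of A's two-parameter memoised recursion to collapse the state to the position alone: B first computes the reachable-position bound M with one scan, then fills an iterative bottom-up table over positions M..0 (no recursion, no cache) and returns the entry for position 0.
import Mathlib
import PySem

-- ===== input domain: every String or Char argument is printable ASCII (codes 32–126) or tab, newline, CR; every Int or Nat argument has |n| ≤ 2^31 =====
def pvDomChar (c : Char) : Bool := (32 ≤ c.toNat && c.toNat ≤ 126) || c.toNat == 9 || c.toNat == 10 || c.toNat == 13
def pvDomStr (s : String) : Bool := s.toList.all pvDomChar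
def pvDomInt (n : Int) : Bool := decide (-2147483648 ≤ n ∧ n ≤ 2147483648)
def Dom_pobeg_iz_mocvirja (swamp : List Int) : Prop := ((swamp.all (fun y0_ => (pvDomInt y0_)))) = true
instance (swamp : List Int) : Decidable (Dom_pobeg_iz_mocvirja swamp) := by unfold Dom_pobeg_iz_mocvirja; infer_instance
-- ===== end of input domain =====

-- B replaces A's memoised two-parameter recursion by an iterative bottom-up table
-- over the reachable positions (objective: alternative decomposition; return value only).

-- ===== PORT A =====
-- aux(energy, k) of A; the fuel argument only makes the recursion total in Lean
-- (inside Pre_ it is proved never to run out); lru_cache is a pure-performance detail.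
def auxA (swamp : List Int) (l : Int) : Nat → Int → Int → Int
  | 0, _, _ => 0
  | fuel+1, energy, k =>
    match PySem.List.pyGet? swamp k with
    | none => 0          -- Python: IndexError (excluded by Pre_)
    | some bonus =>
      if energy + bonus > l - k then 1
      else
        1 + ((PySem.List.min? ((PySem.List.pyRange 1 (energy + bonus + 1) 1).map
              (fun i => auxA swamp l fuel (energy - i) (k + i))) (fun x => x)).getD 0)
        -- .getD 0: Python raises ValueError on min([]) (excluded by Pre_)

def pobeg_iz_mocvirja (swamp : List Int) : Int :=
  auxA swamp (swamp.length : Int) (swamp.length + 1) 0 0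

-- ===== PORT B =====
-- the `while k <= M` scan computing the reachable bound M (fuel = totality guard only)
def altMloop (swamp : List Int) (l : Int) : Nat → Int → Int → Int
  | 0, _, M => M
  | fuel+1, k, M =>
    if k ≤ M then
      match PySem.List.pyGet? swamp k with
      | none => M        -- Python: IndexError (excluded by Pre_)
      | some b => altMloop swamp l fuel (k+1) (if b ≤ l ∧ M < b then b else M)
    else M

-- one iteration of B's `for k in range(M, -1, -1)` loop body: prepend f[k]
def altStep (swamp : List Int) (l : Int) (k : Int) (acc : List Int) : List Int :=
  match PySem.List.pyGet? swamp k with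
  | none => 0 :: acc     -- Python: IndexError (excluded by Pre_)
  | some b =>
      if b > l then 1 :: acc
      else (1 + ((PySem.List.min? ((PySem.List.pyRange 0 (b - k) 1).map
            (fun j => (PySem.List.pyGet? acc j).getD 0)) (fun x => x)).getD 0)) :: acc
        -- .getD 0 twice: Python raises ValueError/IndexError there (excluded by Pre_)

-- the table loop, d iterations done, running k = M - d + 1 … M already in acc
def altBuild (swamp : List Int) (l : Int) (M : Int) : Nat → List Int
  | 0 => []
  | d+1 => altStep swamp l (M - d) (altBuild swamp l M d)

def pobeg_iz_mocvirja_alt (swamp : List Int) : Int :=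
  (altBuild swamp (swamp.length : Int)
      (altMloop swamp (swamp.length : Int) (swamp.length + 1) 0 0)
      ((altMloop swamp (swamp.length : Int) (swamp.length + 1) 0 0).toNat + 1)).headD 0

-- ===== PRECONDITION & SPEC =====
-- Pre_ = exactly the inputs on which A returns normally: otherwise A raises
-- (IndexError when a reachable jump lands on the index len(swamp), ValueError from
-- min over an empty sequence when a reachable position cannot move forward).
-- M bounds the positions reachable from position 0.
def Pre_pobeg_iz_mocvirja (swamp : List Int) : Prop :=
  swamp ≠ [] ∧ ∃ M ∈ List.range swamp.length,
    (∀ k ∈ List.range (M+1),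
        (swamp.length : Int) < swamp.getD k 0 ∨
        ((k : Int) < swamp.getD k 0 ∧ swamp.getD k 0 < (swamp.length : Int))) ∧
    (∀ k ∈ List.range (M+1),
        swamp.getD k 0 ≤ (swamp.length : Int) → swamp.getD k 0 ≤ (M : Int))
instance (swamp : List Int) : Decidable (Pre_pobeg_iz_mocvirja swamp) := by
  unfold Pre_pobeg_iz_mocvirja; infer_instance

def pvWitness_pobeg_iz_mocvirja : List Int := [5]

def Spec_pobeg_iz_mocvirja (swamp : List Int) (out : Int) : Prop := out = pobeg_iz_mocvirja_alt swamp
instance (swamp : List Int) (out : Int) : Decidable (Spec_pobeg_iz_mocvirja swamp out) := by unfold Spec_pobeg_iz_mocvirja; infer_instance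

-- ===== CLAIM (what is proved, stated in full; the proofs are below) =====
def Claim_equal_pobeg_iz_mocvirja : Prop := ∀ (swamp : List Int), Dom_pobeg_iz_mocvirja swamp → Pre_pobeg_iz_mocvirja swamp → Spec_pobeg_iz_mocvirja swamp (pobeg_iz_mocvirja swamp)

-- ===== LEMMAS AND PROOFS =====

-- the common mathematical value of position k (both ports are proved equal to pvF _ 0)
def pvF (swamp : List Int) (k : Nat) : Int :=
  if h : k < swamp.length then
    let b := swamp[k]
    if (swamp.length : Int) < b then 1
    else 1 + ((PySem.List.min? ((List.range (b - (k:Int)).toNat).map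
          (fun j => pvF swamp (k + 1 + j))) (fun x => x)).getD 0)
  else 0
termination_by swamp.length - k
decreasing_by omega

-- every position up to M is "good": its jump either escapes or stays strictly inside
def pvGood (swamp : List Int) (M : Nat) : Prop :=
  ∀ k : Nat, k ≤ M →
    (swamp.length : Int) < swamp.getD k 0 ∨
    ((k : Int) < swamp.getD k 0 ∧ swamp.getD k 0 < (swamp.length : Int))

-- M is closed under jumps that do not escape
def pvClosed (swamp : List Int) (M : Nat) : Prop :=
  ∀ k : Nat, k ≤ M → swamp.getD k 0 ≤ (swamp.length : Int) → swamp.getD k 0 ≤ (M : Int)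

theorem pvF_unfold (swamp : List Int) (k : Nat) (h : k < swamp.length) :
    pvF swamp k =
      if (swamp.length : Int) < swamp[k] then 1
      else 1 + ((PySem.List.min? ((List.range (swamp[k] - (k:Int)).toNat).map
            (fun j => pvF swamp (k + 1 + j))) (fun x => x)).getD 0) := by
  rw [pvF]; simp [h]

theorem auxA_eq (swamp : List Int) (M : Nat) (hM : M < swamp.length)
    (hg : pvGood swamp M) (hc : pvClosed swamp M) :
    ∀ fuel k, k ≤ M → swamp.length - k < fuel →
      auxA swamp (swamp.length : Int) fuel (-(k : Int)) (k : Int) = pvF swamp k := by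
  intro fuel
  induction fuel with
  | zero => intro k _ h; omega
  | succ fuel ih =>
    intro k hk hfuel
    have hkl : k < swamp.length := by omega
    have hget : PySem.List.pyGet? swamp (k : Int) = swamp[k]? := PySem.List.pyGet?_natCast swamp k
    have hsome : swamp[k]? = some swamp[k] := List.getElem?_eq_getElem hkl
    have hgd : swamp.getD k 0 = swamp[k] := List.getD_eq_getElem swamp 0 hkl
    rw [auxA, hget, hsome, pvF_unfold swamp k hkl]
    by_cases hb : (swamp.length : Int) < swamp[k]
    · have : -(k : Int) + swamp[k] > (swamp.length : Int) - k := by omega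
      simp [this, hb]
    · have hcond : ¬ (-(k : Int) + swamp[k] > (swamp.length : Int) - k) := by omega
      simp only [gt_iff_lt, hcond, hb, if_false]
      have hgood := hg k hk
      rw [hgd] at hgood
      have hkb : (k : Int) < swamp[k] := by rcases hgood with h | ⟨h1, h2⟩ <;> omega
      have hbl : swamp[k] < (swamp.length : Int) := by rcases hgood with h | ⟨h1, h2⟩ <;> omega
      have hclos := hc k hk
      rw [hgd] at hclos
      have hbM : swamp[k] ≤ (M : Int) := hclos (by omega)
      congr 2
      -- the two children lists are equal
      rw [PySem.List.pyRange_one]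
      have harg : (-(k:Int) + swamp[k] + 1 - 1).toNat = (swamp[k] - (k:Int)).toNat := by omega
      rw [harg, List.map_map]
      apply congrArg (fun t => PySem.List.min? t (fun x => x))
      apply List.map_congr_left
      intro j hj
      have hjlt : j < (swamp[k] - (k:Int)).toNat := List.mem_range.mp hj
      have hkj : k + 1 + j ≤ M := by omega
      have e1 : -(k : Int) - (1 + (j:Int)) = -((k + 1 + j : Nat) : Int) := by push_cast; ring
      have e2 : (k : Int) + (1 + (j:Int)) = ((k + 1 + j : Nat) : Int) := by push_cast; ring
      simp only [Function.comp_apply, e1, e2]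
      exact ih (k + 1 + j) hkj (by omega)

theorem altBuild_eq (swamp : List Int) (M : Nat) (hM : M < swamp.length)
    (hg : pvGood swamp M) (hc : pvClosed swamp M) :
    ∀ d, d ≤ M + 1 →
      altBuild swamp (swamp.length : Int) (M : Int) d
        = (List.range' (M + 1 - d) d).map (pvF swamp) := by
  intro d
  induction d with
  | zero => intro _; simp [altBuild]
  | succ d ih =>
    intro hd
    have hdM : d ≤ M := by omega
    set k : Nat := M - d with hkdef
    have hkM : k ≤ M := by omega
    have hkl : k < swamp.length := by omega
    have hcast : (M : Int) - (d : Int) = ((k : Nat) : Int) := by omega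
    rw [altBuild, ih (by omega), hcast]
    have hrange : M + 1 - (d + 1) = k := by omega
    have hrange2 : M + 1 - d = k + 1 := by omega
    rw [hrange, hrange2]
    have hget : PySem.List.pyGet? swamp (k : Int) = swamp[k]? := PySem.List.pyGet?_natCast swamp k
    have hsome : swamp[k]? = some swamp[k] := List.getElem?_eq_getElem hkl
    have hgd : swamp.getD k 0 = swamp[k] := List.getD_eq_getElem swamp 0 hkl
    have hcons : List.range' k (d+1) = k :: List.range' (k+1) d := List.range'_succ
    rw [altStep, hget, hsome, hcons, List.map_cons, pvF_unfold swamp k hkl]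
    by_cases hb : (swamp.length : Int) < swamp[k]
    · simp [hb]
    · have hgood := hg k hkM
      rw [hgd] at hgood
      have hkb : (k : Int) < swamp[k] := by rcases hgood with h | ⟨h1, h2⟩ <;> omega
      have hbl : swamp[k] < (swamp.length : Int) := by rcases hgood with h | ⟨h1, h2⟩ <;> omega
      have hbM : swamp[k] ≤ (M : Int) := by
        have := hc k hkM; rw [hgd] at this; exact this (by omega)
      simp only [if_neg hb]
      congr 3
      -- the children lists agree
      rw [PySem.List.pyRange_one]
      have harg : (swamp[k] - (k:Int) - 0).toNat = (swamp[k] - (k:Int)).toNat := by omega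
      rw [harg, List.map_map]
      apply congrArg (fun t => PySem.List.min? t (fun x => x))
      apply List.map_congr_left
      intro j hj
      have hjlt : j < (swamp[k] - (k:Int)).toNat := List.mem_range.mp hj
      have hjd : j < d := by omega
      have e0 : (0 : Int) + (j : Int) = (j : Int) := by ring
      simp only [Function.comp_apply, e0]
      have hidx : PySem.List.pyGet? ((List.range' (k+1) d).map (pvF swamp)) ((j : Nat) : Int)
          = ((List.range' (k+1) d).map (pvF swamp))[j]? :=
        PySem.List.pyGet?_natCast _ j
      rw [hidx]
      have hlen : j < ((List.range' (k+1) d).map (pvF swamp)).length := by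
        simp [List.length_range', hjd]
      rw [List.getElem?_eq_getElem hlen]
      simp [List.getElem_range']

theorem altMloop_spec (swamp : List Int) (Mw : Nat) (hMw : Mw < swamp.length)
    (hg : pvGood swamp Mw) (hc : pvClosed swamp Mw) :
    ∀ fuel (k M : Nat), M ≤ Mw → k ≤ M + 1 →
      (∀ j : Nat, j < k → swamp.getD j 0 ≤ (swamp.length : Int) → swamp.getD j 0 ≤ (M : Int)) →
      Mw + 2 ≤ fuel + k →
      ∃ Mr : Nat, altMloop swamp (swamp.length : Int) fuel (k : Int) (M : Int) = (Mr : Int)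
        ∧ M ≤ Mr ∧ Mr ≤ Mw ∧ pvClosed swamp Mr := by
  intro fuel
  induction fuel with
  | zero => intro k M hMle hkM _ hfuel; omega
  | succ fuel ih =>
    intro k M hMle hkM hinv hfuel
    rw [altMloop]
    by_cases hk : (k : Int) ≤ (M : Int)
    · have hkM' : k ≤ M := by omega
      have hkl : k < swamp.length := by omega
      have hget : PySem.List.pyGet? swamp (k : Int) = swamp[k]? := PySem.List.pyGet?_natCast swamp k
      have hsome : swamp[k]? = some swamp[k] := List.getElem?_eq_getElem hkl
      have hgd : swamp.getD k 0 = swamp[k] := List.getD_eq_getElem swamp 0 hkl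
      rw [if_pos hk, hget, hsome]
      dsimp only
      by_cases hcnd : swamp[k] ≤ (swamp.length : Int) ∧ (M : Int) < swamp[k]
      · -- M is raised to swamp[k]
        have hgood := hg k (by omega)
        rw [hgd] at hgood
        have hclos := hc k (by omega)
        rw [hgd] at hclos
        have hbMw : swamp[k] ≤ (Mw : Int) := hclos hcnd.1
        have hbpos : (0 : Int) ≤ swamp[k] := by omega
        have hbe : swamp[k] = ((swamp[k].toNat : Nat) : Int) := by omega
        rw [if_pos hcnd]
        have hc1 : (k : Int) + 1 = ((k + 1 : Nat) : Int) := by push_cast; ring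
        rw [hc1, hbe]
        have hinv' : ∀ j : Nat, j < k + 1 → swamp.getD j 0 ≤ (swamp.length : Int) →
            swamp.getD j 0 ≤ ((swamp[k].toNat : Nat) : Int) := by
          intro j hj hjle
          by_cases hjk : j < k
          · have := hinv j hjk hjle; omega
          · have hje : j = k := by omega
            rw [hje, hgd]; omega
        obtain ⟨Mr, h1, h2, h3, h4⟩ :=
          ih (k+1) swamp[k].toNat (by omega) (by omega) hinv' (by omega)
        exact ⟨Mr, h1, by omega, h3, h4⟩
      · rw [if_neg hcnd]
        have hc1 : (k : Int) + 1 = ((k + 1 : Nat) : Int) := by push_cast; ring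
        rw [hc1]
        have hinv' : ∀ j : Nat, j < k + 1 → swamp.getD j 0 ≤ (swamp.length : Int) →
            swamp.getD j 0 ≤ (M : Int) := by
          intro j hj hjle
          by_cases hjk : j < k
          · exact hinv j hjk hjle
          · have hje : j = k := by omega
            rw [hje, hgd]
            rw [hje, hgd] at hjle
            omega
        exact ih (k+1) M hMle (by omega) hinv' (by omega)
    · rw [if_neg hk]
      refine ⟨M, rfl, le_refl M, hMle, ?_⟩
      intro j hj hjle
      exact hinv j (by omega) hjle

-- ===== VERDICT (by name: the statement is the Claim_ definition above) =====
theorem pobeg_iz_mocvirja_spec : Claim_equal_pobeg_iz_mocvirja := by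
  intro swamp _ hpre
  obtain ⟨hne, Mw, hMwmem, hg', hc'⟩ := hpre
  have hMw : Mw < swamp.length := List.mem_range.mp hMwmem
  have hg : pvGood swamp Mw := by
    intro k hk; exact hg' k (List.mem_range.mpr (by omega))
  have hc : pvClosed swamp Mw := by
    intro k hk; exact hc' k (List.mem_range.mpr (by omega))
  unfold Spec_pobeg_iz_mocvirja pobeg_iz_mocvirja pobeg_iz_mocvirja_alt
  -- A side
  have hA : auxA swamp (swamp.length : Int) (swamp.length + 1) 0 0 = pvF swamp 0 := by
    have := auxA_eq swamp Mw hMw hg hc (swamp.length + 1) 0 (Nat.zero_le Mw) (by omega)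
    simpa using this
  -- B side
  obtain ⟨Mr, hMloop, _, hMrMw, hMrclosed⟩ :=
    altMloop_spec swamp Mw hMw hg hc (swamp.length + 1) 0 0 (Nat.zero_le Mw)
      (by omega) (by intro j hj; omega) (by omega)
  have hMr : Mr < swamp.length := by omega
  norm_num at hMloop
  have hgMr : pvGood swamp Mr := fun k hk => hg k (by omega)
  have hBtab := altBuild_eq swamp Mr hMr hgMr hMrclosed (Mr + 1) (le_refl _)
  rw [hMloop]
  simp only [Int.toNat_natCast]
  rw [hBtab]
  simp [List.range'_succ, hA]
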